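-- pv_equiv track=rewrite | github.com/Filarius/Pydeofy | multihotencoding.py | _get_row_size
-- ===== SOURCE A (Python) =====
-- import math
--
-- def _get_row_size(vals, ones):
--     if ones == 1:
--         return vals
--     target = vals * math.factorial(ones)
--     xmin = 1
--     xmax = ones + 1
--     p = 1
--     for i in range(2, ones + 1):
--         p *= i
--     while p <= target:
--         p = p // xmin
--         p *= xmax
--         xmin += 1
--         xmax += 1
--     return xmax - 1
-- ===== SOURCE B (Python) =====
-- import math
--
-- def _get_row_size(vals, ones):
--     # exponential + binary search for the smallest m >= ones with C(m, ones) > vals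
--     if ones == 1:
--         return vals
--     lo = ones
--     hi = ones + 1
--     while math.comb(hi, ones) <= vals:
--         lo = hi
--         hi = hi * 2
--     while lo < hi:
--         mid = (lo + hi) // 2
--         if math.comb(mid, ones) > vals:
--             hi = mid
--         else:
--             lo = mid + 1
--     return lo
-- ===== Notes on version B (the rewrite author's own statement) =====
-- stated objective: faster
-- what changed: B finds the smallest m with C(m, ones) > vals by exponential growth plus binary search on math.comb instead of A's step-by-step falling-factorial update, so it does O(log answer) comb evaluations instead of O(answer) bignum multiply/divide steps.
import Mathlib
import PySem

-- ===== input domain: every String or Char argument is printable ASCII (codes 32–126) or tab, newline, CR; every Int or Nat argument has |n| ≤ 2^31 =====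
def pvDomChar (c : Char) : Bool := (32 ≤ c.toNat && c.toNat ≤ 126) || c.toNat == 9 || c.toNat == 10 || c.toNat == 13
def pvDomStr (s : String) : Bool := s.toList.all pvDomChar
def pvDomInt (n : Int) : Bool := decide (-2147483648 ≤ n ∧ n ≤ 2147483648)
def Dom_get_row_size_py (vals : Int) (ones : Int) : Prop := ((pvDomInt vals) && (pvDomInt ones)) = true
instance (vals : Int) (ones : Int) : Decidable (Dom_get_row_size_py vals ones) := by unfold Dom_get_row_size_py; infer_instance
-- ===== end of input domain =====

-- B replaces A's one-by-one incremental falling-factorial scan by an exponential-growth plus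
-- binary search on math.comb, evaluating C(m, ones) > vals directly (objective: faster).

-- ===== PORT A =====
-- A's while loop; the fuel argument only makes the loop total (it provably suffices on Pre_,
-- and the fuel-exhausted branch returns the same `xmax - 1` the loop exit returns).
def pvAloop (target : Int) : Nat → Int → Int → Int → Int
  | 0, _, xmax, _ => xmax - 1
  | fuel+1, xmin, xmax, p =>
    if p ≤ target then pvAloop target fuel (xmin+1) (xmax+1) (PySem.Int.floordiv p xmin * xmax)
    else xmax - 1

def get_row_size_py (vals : Int) (ones : Int) : Int :=
  if ones = 1 then vals
  else
    -- math.factorial(ones): exact for ones ≥ 0; Pre_ excludes ones < 0, where Python raises ValueError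
    let target := vals * (Nat.factorial ones.toNat : Int)
    -- the `for i in range(2, ones + 1): p *= i` loop
    let p := (PySem.List.pyRange 2 (ones+1) 1).foldl (fun p i => p * i) 1
    pvAloop target (vals.toNat + 1) 1 (ones+1) p

-- ===== PORT B =====
-- math.comb(m, k): exact for m, k ≥ 0 (the only arguments B reaches under Pre_)
def pvComb (m k : Int) : Int := (m.toNat.choose k.toNat : Int)

-- B's doubling loop; fuel only makes it total (it provably suffices on Pre_)
def pvGrow (vals ones : Int) : Nat → Int → Int → Int × Int
  | 0, lo, hi => (lo, hi)
  | fuel+1, lo, hi =>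
    if pvComb hi ones ≤ vals then pvGrow vals ones fuel hi (hi*2) else (lo, hi)

-- B's binary-search loop; the fuel argument (hi - lo at the call site) only makes the
-- while loop total: the gap shrinks by at least one per iteration, so it provably suffices
def pvBin (vals ones : Int) : Nat → Int → Int → Int
  | 0, lo, _ => lo
  | f+1, lo, hi =>
    if lo < hi then
      let mid := PySem.Int.floordiv (lo + hi) 2
      if vals < pvComb mid ones then pvBin vals ones f lo mid
      else pvBin vals ones f (mid+1) hi
    else lo

def get_row_size_py_alt (vals : Int) (ones : Int) : Int :=
  if ones = 1 then vals
  else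
    let g := pvGrow vals ones (vals.toNat + ones.toNat + 2) ones (ones+1)
    pvBin vals ones (g.2 - g.1).toNat g.1 g.2

-- ===== PRECONDITION & SPEC =====
-- Pre_ excludes ones < 0 (math.factorial raises ValueError) and ones = 0 with vals ≥ 1
-- (A's while loop never terminates there); A returns normally everywhere else.
def Pre_get_row_size_py (vals : Int) (ones : Int) : Prop := 1 ≤ ones ∨ (ones = 0 ∧ vals ≤ 0)
instance (vals : Int) (ones : Int) : Decidable (Pre_get_row_size_py vals ones) := by
  unfold Pre_get_row_size_py; infer_instance
def pvWitness_get_row_size_py : Int × Int := (5, 2)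

def Spec_get_row_size_py (vals : Int) (ones : Int) (out : Int) : Prop := out = get_row_size_py_alt vals ones
instance (vals : Int) (ones : Int) (out : Int) : Decidable (Spec_get_row_size_py vals ones out) := by unfold Spec_get_row_size_py; infer_instance

-- ===== CLAIM (what is proved, stated in full; the proofs are below) =====
def Claim_equal_get_row_size_py : Prop := ∀ (vals : Int) (ones : Int), Dom_get_row_size_py vals ones → Pre_get_row_size_py vals ones → Spec_get_row_size_py vals ones (get_row_size_py vals ones)

-- ===== LEMMAS AND PROOFS =====

-- C(n+v, n) ≥ v + 1 for n ≥ 1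
theorem pvChooseLB (n : Nat) (hn : 1 ≤ n) : ∀ v : Nat, v + 1 ≤ (n + v).choose n := by
  intro v
  induction v with
  | zero => simp [Nat.choose_self]
  | succ v ih =>
    obtain ⟨t, rfl⟩ := Nat.exists_eq_add_of_le hn
    have h1 : (1 + t + (v+1)).choose (1 + t) = (1 + t + v).choose t + (1 + t + v).choose (t+1) := by
      have : 1 + t + (v + 1) = (1 + t + v) + 1 := by omega
      rw [this]
      have : 1 + t = t + 1 := by omega
      rw [this, Nat.choose_succ_succ]
    have h2 : 0 < (1 + t + v).choose t := Nat.choose_pos (by omega)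
    have h3 : (1 + t + v).choose (t + 1) = (1 + t + v).choose (1 + t) := by
      congr 1; omega
    omega

def pvFF (n k : Nat) : Int := ((n + k).descFactorial n : Int)


-- the characterization: for m ≥ n, C(m, n) > vals ↔ m ≥ n + K, where K is the least index
-- with vals < C(n+K, n)
theorem pvChar (n K : Nat) (vals : Int)
    (hKP : vals < ((n + K).choose n : Int))
    (hKmin : ∀ j : Nat, j < K → ¬ vals < ((n + j).choose n : Int)) :
    ∀ m : Int, (n : Int) ≤ m → (vals < pvComb m (n : Int) ↔ (n : Int) + K ≤ m) := by
  intro m hm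
  have hm0 : 0 ≤ m := le_trans (Int.natCast_nonneg n) hm
  have hmt := Int.toNat_of_nonneg hm0
  have hjn : n ≤ m.toNat := by omega
  obtain ⟨j, hj⟩ := Nat.exists_eq_add_of_le hjn
  have hcomb : pvComb m (n : Int) = ((n + j).choose n : Int) := by
    unfold pvComb; rw [Int.toNat_natCast, hj]
  rw [hcomb]
  constructor
  · intro h
    by_contra hlt
    have hjK : j < K := by omega
    exact hKmin j hjK h
  · intro h
    have hK : K ≤ j := by omega
    have hmono : (n + K).choose n ≤ (n + j).choose n :=
      Nat.choose_le_choose n (by omega)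
    calc vals < ((n + K).choose n : Int) := hKP
    _ ≤ ((n + j).choose n : Int) := by exact_mod_cast hmono


-- A's `p *= i` loop computes ones!
theorem pvFactFold (n : Nat) :
    (PySem.List.pyRange 2 ((n : Int) + 1) 1).foldl (fun p i => p * i) 1 = (n.factorial : Int) := by
  induction n with
  | zero => rw [PySem.List.pyRange_one_eq_nil (by norm_num)]; simp [Nat.factorial]
  | succ n ih =>
    rcases Nat.eq_zero_or_pos n with h | h
    · subst h
      rw [show (((0:Nat)+1 : Nat) : Int) + 1 = 2 by norm_num,
         PySem.List.pyRange_one_eq_nil (by norm_num)]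
      simp [Nat.factorial]
    · have hc : ((n + 1 : Nat) : Int) + 1 = ((n : Int) + 1) + 1 := by push_cast; ring
      rw [hc, PySem.List.pyRange_one_succ_right (by exact_mod_cast Nat.succ_le_succ h),
         List.foldl_append, ih]
      simp only [List.foldl_cons, List.foldl_nil]
      push_cast [Nat.factorial_succ]
      ring


theorem pvFF_step (n k : Nat) (hn : 1 ≤ n) :
    PySem.Int.floordiv (pvFF n k) ((k : Int) + 1) * ((n : Int) + 1 + k) = pvFF n (k + 1) := by
  obtain ⟨t, rfl⟩ := Nat.exists_eq_add_of_le hn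
  have hd : (1 + t + k).descFactorial (1 + t) = (k + 1) * (1 + t + k).descFactorial t := by
    have h1 : 1 + t = t + 1 := by omega
    rw [h1, Nat.descFactorial_succ]
    congr 1; omega
  have hd2 : (1 + t + (k + 1)).descFactorial (1 + t) = (1 + t + k + 1) * (1 + t + k).descFactorial t := by
    have h1 : 1 + t + (k + 1) = (1 + t + k) + 1 := by omega
    have h2 : 1 + t = t + 1 := by omega
    rw [h1, h2, Nat.succ_descFactorial_succ]
  rw [pvFF, pvFF, hd, hd2]
  have hcast : (((k + 1) * (1 + t + k).descFactorial t : Nat) : Int)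
      = ((k : Int) + 1) * ((1 + t + k).descFactorial t : Int) := by push_cast; ring
  rw [hcast]
  rw [PySem.Int.floordiv_eq_ediv_of_pos (by omega : (0:Int) < (k:Int)+1),
     Int.mul_ediv_cancel_left _ (by omega : ((k:Int)+1) ≠ 0)]
  push_cast; ring


theorem pvFF_le_iff (n k : Nat) (vals : Int) :
    pvFF n k ≤ vals * (n.factorial : Int) ↔ ((n + k).choose n : Int) ≤ vals := by
  have hfac : (0 : Int) < (n.factorial : Int) := by exact_mod_cast n.factorial_pos
  rw [pvFF, Nat.descFactorial_eq_factorial_mul_choose]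
  push_cast
  constructor
  · intro h
    nlinarith
  · intro h
    calc ((n.factorial : Int)) * ((n+k).choose n : Int) = ((n+k).choose n : Int) * (n.factorial : Int) := by ring
    _ ≤ vals * (n.factorial : Int) := by exact mul_le_mul_of_nonneg_right h (le_of_lt hfac)


theorem pvAloop_eq (n K : Nat) (vals : Int)
    (hKP : vals < ((n + K).choose n : Int))
    (hKmin : ∀ j : Nat, j < K → ¬ vals < ((n + j).choose n : Int))
    (hn : 1 ≤ n ∨ K = 0) :
    ∀ (f k : Nat), k ≤ K → K - k < f →
      pvAloop (vals * (n.factorial : Int)) f ((k : Int) + 1) ((n : Int) + 1 + k) (pvFF n k)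
        = (n : Int) + K := by
  intro f
  induction f with
  | zero => intro k _ h; omega
  | succ f ih =>
    intro k hk hf
    rw [pvAloop]
    by_cases hle : pvFF n k ≤ vals * (n.factorial : Int)
    · rw [if_pos hle]
      have hnotP : ¬ vals < ((n + k).choose n : Int) := by
        rw [pvFF_le_iff] at hle; omega
      have hkK : k < K := by
        rcases Nat.lt_or_ge k K with h | h
        · exact h
        · exact absurd (lt_of_lt_of_le hKP (by exact_mod_cast Nat.choose_le_choose n (by omega))) hnotP
      have hn1 : 1 ≤ n := by
        rcases hn with h | h
        · exact h
        · omega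
      have := ih (k + 1) (by omega) (by omega)
      rw [pvFF_step n k hn1]
      have e1 : ((k + 1 : Nat) : Int) + 1 = (k : Int) + 1 + 1 := by push_cast; ring
      have e2 : ((n : Int)) + 1 + ((k + 1 : Nat) : Int) = (n : Int) + 1 + (k : Int) + 1 := by
        push_cast; ring
      rw [e1, e2] at this
      exact this
    · rw [if_neg hle]
      have hP : vals < ((n + k).choose n : Int) := by
        rw [pvFF_le_iff] at hle; omega
      have hKk : K ≤ k := by
        by_contra hlt
        exact hKmin k (by omega) hP
      have : k = K := by omega
      subst this
      ring

theorem pvGrow_eq (n K : Nat) (vals : Int)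
    (hKP : vals < ((n + K).choose n : Int))
    (hKmin : ∀ j : Nat, j < K → ¬ vals < ((n + j).choose n : Int)) :
    ∀ (f : Nat) (lo hi : Int), (n : Int) ≤ lo → (n : Int) < hi → lo ≤ (n : Int) + K →
      (n : Int) + K ≤ hi + f →
      (n : Int) ≤ (pvGrow vals (n : Int) f lo hi).1 ∧
      (pvGrow vals (n : Int) f lo hi).1 ≤ (n : Int) + K ∧
      (n : Int) + K ≤ (pvGrow vals (n : Int) f lo hi).2 := by
  have hchar := pvChar n K vals hKP hKmin
  intro f
  induction f with
  | zero =>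
    intro lo hi h1 h2 h3 h4
    rw [pvGrow]
    exact ⟨h1, h3, by omega⟩
  | succ f ih =>
    intro lo hi h1 h2 h3 h4
    rw [pvGrow]
    by_cases hc : pvComb hi (n : Int) ≤ vals
    · rw [if_pos hc]
      have hhiM : hi < (n : Int) + K := by
        by_contra hcon
        have := (hchar hi (by omega)).mpr (by omega)
        omega
      exact ih hi (hi * 2) (by omega) (by omega) (by omega) (by omega)
    · rw [if_neg hc]
      have hMhi : (n : Int) + K ≤ hi := (hchar hi (by omega)).mp (by omega)
      exact ⟨h1, h3, hMhi⟩

theorem pvBin_eq (n K : Nat) (vals : Int)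
    (hKP : vals < ((n + K).choose n : Int))
    (hKmin : ∀ j : Nat, j < K → ¬ vals < ((n + j).choose n : Int)) :
    ∀ (f : Nat) (lo hi : Int), (hi - lo).toNat ≤ f → (n : Int) ≤ lo → lo ≤ (n : Int) + K →
      (n : Int) + K ≤ hi →
      pvBin vals (n : Int) f lo hi = (n : Int) + K := by
  have hchar := pvChar n K vals hKP hKmin
  intro f
  induction f with
  | zero =>
    intro lo hi hN h1 h2 h3
    rw [pvBin]
    omega
  | succ f ih =>
    intro lo hi hN h1 h2 h3
    rw [pvBin]
    by_cases h : lo < hi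
    · rw [if_pos h]
      have hmlo : lo ≤ PySem.Int.floordiv (lo + hi) 2 :=
        (PySem.Int.floordiv_two_mid_bounds (le_of_lt h)).1
      have hmhi : PySem.Int.floordiv (lo + hi) 2 < hi := by
        rw [PySem.Int.floordiv_lt_iff_lt_mul (by omega)]; omega
      show (if vals < pvComb (PySem.Int.floordiv (lo + hi) 2) (n : Int) then
          pvBin vals (n : Int) f lo (PySem.Int.floordiv (lo + hi) 2)
        else pvBin vals (n : Int) f (PySem.Int.floordiv (lo + hi) 2 + 1) hi) = (n : Int) + K
      by_cases hc : vals < pvComb (PySem.Int.floordiv (lo + hi) 2) (n : Int)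
      · rw [if_pos hc]
        have hM : (n : Int) + K ≤ PySem.Int.floordiv (lo + hi) 2 :=
          (hchar _ (by omega)).mp hc
        exact ih lo _ (by omega) h1 h2 hM
      · rw [if_neg hc]
        have hM : PySem.Int.floordiv (lo + hi) 2 < (n : Int) + K := by
          by_contra hcon
          have := (hchar (PySem.Int.floordiv (lo + hi) 2) (by omega)).mpr (by omega)
          omega
        exact ih _ hi (by omega) (by omega) (by omega) h3
    · rw [if_neg h]
      omega

-- ===== VERDICT (by name: the statement is the Claim_ definition above) =====
theorem get_row_size_py_spec : Claim_equal_get_row_size_py := by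
  intro vals ones _ hPre
  unfold Pre_get_row_size_py at hPre
  unfold Spec_get_row_size_py
  by_cases h1 : ones = 1
  · simp [get_row_size_py, get_row_size_py_alt, h1]
  · have hones0 : 0 ≤ ones := by omega
    have hcast : ones = (ones.toNat : Int) := (Int.toNat_of_nonneg hones0).symm
    set n := ones.toNat with hn
    have hPtop : vals < ((n + vals.toNat).choose n : Int) := by
      rcases (by omega : vals ≤ 0 ∨ 0 < vals) with hv | hv
      · have hpos : 0 < (n + vals.toNat).choose n := Nat.choose_pos (by omega)
        have h2 : (1 : Int) ≤ ((n + vals.toNat).choose n : Int) := by exact_mod_cast hpos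
        omega
      · have hn1 : 1 ≤ n := by omega
        have hLB := pvChooseLB n hn1 vals.toNat
        have h2 : vals < ((vals.toNat : Nat) : Int) + 1 := by omega
        calc vals < ((vals.toNat : Nat) : Int) + 1 := h2
        _ ≤ ((n + vals.toNat).choose n : Int) := by exact_mod_cast hLB
    have hex : ∃ j : Nat, vals < ((n + j).choose n : Int) := ⟨vals.toNat, hPtop⟩
    have hKP : vals < ((n + Nat.find hex).choose n : Int) := Nat.find_spec hex
    have hKmin : ∀ j : Nat, j < Nat.find hex → ¬ vals < ((n + j).choose n : Int) :=
      fun j hj => Nat.find_min hex hj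
    have hKle : Nat.find hex ≤ vals.toNat := Nat.find_min' hex hPtop
    have hnK : 1 ≤ n ∨ Nat.find hex = 0 := by
      rcases Nat.eq_zero_or_pos n with h0 | hpos
      · right
        have hv0 : vals ≤ 0 := by omega
        have hP0 : vals < ((n + 0).choose n : Int) := by
          have he : (n + 0).choose n = 1 := by simp
          rw [he]; omega
        have := Nat.find_min' hex hP0
        omega
      · left; exact hpos
    have hA : get_row_size_py vals ones = (n : Int) + (Nat.find hex : Int) := by
      rw [get_row_size_py, if_neg h1]
      show pvAloop (vals * (ones.toNat.factorial : Int)) (vals.toNat + 1) 1 (ones + 1)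
          ((PySem.List.pyRange 2 (ones + 1) 1).foldl (fun p i => p * i) 1) = _
      rw [hcast]
      simp only [Int.toNat_natCast]
      rw [pvFactFold n]
      have h0 := pvAloop_eq n (Nat.find hex) vals hKP hKmin hnK (vals.toNat + 1) 0
        (by omega) (by omega)
      rw [pvFF] at h0
      simp only [Nat.cast_zero, add_zero, zero_add, Nat.descFactorial_self] at h0
      exact h0
    have hB : get_row_size_py_alt vals ones = (n : Int) + (Nat.find hex : Int) := by
      rw [get_row_size_py_alt, if_neg h1]
      show pvBin vals ones
          (((pvGrow vals ones (vals.toNat + ones.toNat + 2) ones (ones + 1)).2 -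
            (pvGrow vals ones (vals.toNat + ones.toNat + 2) ones (ones + 1)).1).toNat)
          (pvGrow vals ones (vals.toNat + ones.toNat + 2) ones (ones + 1)).1
          (pvGrow vals ones (vals.toNat + ones.toNat + 2) ones (ones + 1)).2 = _
      rw [hcast]
      simp only [Int.toNat_natCast]
      have hg := pvGrow_eq n (Nat.find hex) vals hKP hKmin (vals.toNat + n + 2)
        ((n : Int)) ((n : Int) + 1) (le_refl _) (by omega) (by omega) (by push_cast; omega)
      exact pvBin_eq n (Nat.find hex) vals hKP hKmin _ _ _ le_rfl hg.1 hg.2.1 hg.2.2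
    rw [hA, hB]
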